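-- pv_equiv track=rewrite | github.com/Phenolah/technical_test | main.py | nth_most_rare_signature
-- ===== SOURCE A (Python) =====
-- def nth_most_rare_signature(list, n):
--     # count of each number in the list it gets stored in num_counts dictonary
--     num_counts = {}
--     for num in list:
--         num_counts[num] = num_counts.get(num, 0) + 1
--
--     # a list of numbers in num_counts in ascending order
--     sorted_num = sorted(num_counts.keys(), key=lambda x: num_counts[x])
--
--     # Return the nth rarest number
--     if 1 <= n <= len(sorted_num):
--         return sorted_num[n - 1]
--     else:
--         return None
-- ===== SOURCE B (Python) =====
-- def nth_most_rare_signature(list, n):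
--     # Bucket sort by occurrence count instead of a comparison sort.
--     counts = {}
--     for num in list:
--         counts[num] = counts.get(num, 0) + 1
--     buckets = {}
--     for num, c in counts.items():
--         buckets.setdefault(c, []).append(num)
--     m = max(counts.values(), default=0)
--     result = []
--     for c in range(1, m + 1):
--         result += buckets.get(c, [])
--     if 1 <= n <= len(result):
--         return result[n - 1]
--     return None
-- ===== Notes on version B (the rewrite author's own statement) =====
-- stated objective: alternative
-- what changed: Replaces A's stable comparison sort of the distinct values by their count with a counting/bucket sort: values are bucketed by their count in dict insertion order and the buckets are concatenated for counts 1..max, preserving the stable tie-break.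
import Mathlib
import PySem

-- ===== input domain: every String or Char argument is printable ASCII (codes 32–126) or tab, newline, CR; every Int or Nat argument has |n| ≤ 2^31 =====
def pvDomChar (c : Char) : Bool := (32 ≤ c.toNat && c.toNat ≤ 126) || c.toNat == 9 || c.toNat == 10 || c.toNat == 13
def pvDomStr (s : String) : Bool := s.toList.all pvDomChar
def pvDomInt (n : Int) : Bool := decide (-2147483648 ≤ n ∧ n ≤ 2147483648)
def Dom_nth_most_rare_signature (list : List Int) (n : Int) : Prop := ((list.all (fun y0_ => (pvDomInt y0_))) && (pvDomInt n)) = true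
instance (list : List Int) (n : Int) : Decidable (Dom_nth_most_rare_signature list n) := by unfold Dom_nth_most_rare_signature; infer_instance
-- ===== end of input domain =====

-- B replaces A's stable comparison sort of the distinct values by their count with a
-- counting/bucket sort: values are bucketed by count in dict insertion order and the
-- buckets are concatenated for counts 1..max.

-- ===== PORT A =====
def nth_most_rare_signature (list : List Int) (n : Int) : Option Int :=
  let num_counts := list.foldl (fun d num => d.insert num (d.getD num 0 + 1)) (PySem.Dict.empty : PySem.Dict Int Int)
  let sorted_num := PySem.List.sorted num_counts.keys (fun x => num_counts.getD x 0) false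
  if 1 ≤ n ∧ n ≤ (sorted_num.length : Int) then PySem.List.pyGet? sorted_num (n - 1) else none

-- ===== PORT B =====
def nth_most_rare_signature_alt (list : List Int) (n : Int) : Option Int :=
  let counts := list.foldl (fun d num => d.insert num (d.getD num 0 + 1)) (PySem.Dict.empty : PySem.Dict Int Int)
  let buckets := counts.items.foldl (fun d p => d.modify p.2 [] (· ++ [p.1])) (PySem.Dict.empty : PySem.Dict Int (List Int))
  let m := PySem.List.maxD counts.values (fun v => v) 0
  let result := (PySem.List.pyRange 1 (m + 1) 1).foldl (fun acc c => acc ++ buckets.getD c []) []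
  if 1 ≤ n ∧ n ≤ (result.length : Int) then PySem.List.pyGet? result (n - 1) else none

-- ===== PRECONDITION & SPEC =====
def Spec_nth_most_rare_signature (list : List Int) (n : Int) (out : Option Int) : Prop := out = nth_most_rare_signature_alt list n
instance (list : List Int) (n : Int) (out : Option Int) : Decidable (Spec_nth_most_rare_signature list n out) := by unfold Spec_nth_most_rare_signature; infer_instance

-- ===== CLAIM (what is proved, stated in full; the proofs are below) =====
def Claim_equal_nth_most_rare_signature : Prop := ∀ (list : List Int) (n : Int), Dom_nth_most_rare_signature list n → Spec_nth_most_rare_signature list n (nth_most_rare_signature list n)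

-- ===== LEMMAS AND PROOFS =====

-- insertBy skips a prefix none of whose elements compare after x
theorem insertBy_append_of_not_before {α : Type} (bef : α → α → Bool) (x : α)
    (as bs : List α) (h : ∀ a ∈ as, bef x a = false) :
    PySem.List.insertBy bef x (as ++ bs) = as ++ PySem.List.insertBy bef x bs := by
  induction as with
  | nil => simp
  | cons a as ih =>
    simp only [List.cons_append, PySem.List.insertBy, h a (by simp)]
    simp [ih (fun a' ha' => h a' (by simp [ha']))]

-- insertBy puts x in front when every element compares after x
theorem insertBy_of_all_before {α : Type} (bef : α → α → Bool) (x : α)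
    (bs : List α) (h : ∀ b ∈ bs, bef x b = true) :
    PySem.List.insertBy bef x bs = x :: bs := by
  cases bs with
  | nil => rfl
  | cons b bs => simp [PySem.List.insertBy, h b (by simp)]

-- inserting x into ascending buckets appends it to the end of its own bucket
theorem insertBy_flatMap_buckets (key : Int → Int) (x : Int) :
    ∀ (cs : List Int) (g : Int → List Int), cs.Pairwise (· < ·) →
    (∀ c ∈ cs, ∀ y ∈ g c, key y = c) → key x ∈ cs →
    PySem.List.insertBy (fun a b => decide (key a < key b)) x (cs.flatMap g) =
      cs.flatMap (fun c => g c ++ if key x = c then [x] else []) := by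
  intro cs
  induction cs with
  | nil => intro g _ _ hx; simp at hx
  | cons c cs ih =>
    intro g hp hg hx
    have hlt : ∀ c' ∈ cs, c < c' := (List.pairwise_cons.mp hp).1
    by_cases h : key x = c
    · have h1 : ∀ y ∈ g c, (decide (key x < key y)) = false := by
        intro y hy; have := hg c (by simp) y hy; simp [this, h]
      rw [List.flatMap_cons, insertBy_append_of_not_before _ _ _ _ h1]
      have h2 : ∀ b ∈ cs.flatMap g, (decide (key x < key b)) = true := by
        intro b hb
        rcases List.mem_flatMap.mp hb with ⟨c', hc', hb'⟩
        have := hg c' (by simp [hc']) b hb'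
        simp [this, h]; exact hlt c' hc'
      rw [insertBy_of_all_before _ _ _ h2]
      have h3 : cs.flatMap (fun c' => g c' ++ if key x = c' then [x] else []) = cs.flatMap g := by
        apply List.flatMap_congr
        intro c' hc'
        have : key x ≠ c' := by have := hlt c' hc'; omega
        simp [this]
      rw [h] at h3
      simp [List.flatMap_cons, h3, h]
    · have hxcs : key x ∈ cs := by
        rcases List.mem_cons.mp hx with h' | h'
        · exact absurd h' h
        · exact h'
      have h1 : ∀ y ∈ g c, (decide (key x < key y)) = false := by
        intro y hy
        have hy' := hg c (by simp) y hy
        have := hlt _ hxcs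
        simp [hy']; omega
      rw [List.flatMap_cons, insertBy_append_of_not_before _ _ _ _ h1,
        ih g (List.pairwise_cons.mp hp).2 (fun c' hc' => hg c' (by simp [hc'])) hxcs]
      simp [List.flatMap_cons, h]

-- stable sort by key = concatenation of the key-buckets, for ascending cs covering all keys
theorem sorted_eq_flatMap_filter (key : Int → Int) (cs : List Int) (hp : cs.Pairwise (· < ·)) :
    ∀ (xs : List Int), (∀ x ∈ xs, key x ∈ cs) →
    PySem.List.sorted xs key false = cs.flatMap (fun c => xs.filter (fun x => key x == c)) := by
  intro xs
  induction xs using List.reverseRecOn with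
  | nil => rw [PySem.List.sorted_eq_foldl_insertBy]; simp
  | append_singleton ys x ih =>
    intro h
    rw [PySem.List.sorted_eq_foldl_insertBy, List.foldl_append]
    rw [← PySem.List.sorted_eq_foldl_insertBy]
    rw [ih (fun y hy => h y (by simp [hy]))]
    simp only [List.foldl_cons, List.foldl_nil]
    rw [insertBy_flatMap_buckets key x cs (fun c => ys.filter (fun y => key y == c)) hp
      (fun c _ y hy => by simpa using (List.mem_filter.mp hy).2) (h x (by simp))]
    congr 1
    funext c
    simp [List.filter_append]
    split_ifs <;> simp_all

-- ===== VERDICT (by name: the statement is the Claim_ definition above) =====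
-- the two programs build the same ordered list of distinct values
theorem result_lists_eq (list : List Int) :
    PySem.List.sorted (PySem.Dict.counter list).keys
      (fun x => (PySem.Dict.counter list).getD x 0) false =
    (PySem.List.pyRange 1 (PySem.List.maxD (PySem.Dict.counter list).values (fun v => v) 0 + 1) 1).flatMap
      (fun c => ((PySem.Dict.counter list).items.foldl
        (fun d p => d.modify p.2 [] (· ++ [p.1])) PySem.Dict.empty).getD c []) := by
  set m := PySem.List.maxD (PySem.Dict.counter list).values (fun v => v) 0 with hm
  -- the buckets dict looks up to a filter of the keys
  have hbucket : ∀ c : Int,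
      ((PySem.Dict.counter list).items.foldl
        (fun d p => d.modify p.2 [] (· ++ [p.1])) PySem.Dict.empty).getD c [] =
      (PySem.Set.ofList list).filter (fun k => ((list.count k : Int) == c)) := by
    intro c
    have h1 : (PySem.Dict.counter list).items.foldl
        (fun d p => d.modify p.2 [] (· ++ [p.1])) PySem.Dict.empty =
        ((PySem.Dict.counter list).items.map (fun p => (p.2, p.1))).foldl
        (fun d p => d.modify p.1 [] (· ++ [p.2])) PySem.Dict.empty := by
      rw [List.foldl_map]
    rw [h1, PySem.Dict.getD_foldl_modify_append, PySem.Dict.items_counter]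
    simp [List.filter_map, Function.comp_def, List.map_map]
  have hkeys : (PySem.Dict.counter list).keys = PySem.Set.ofList list :=
    PySem.Dict.keys_counter list
  have hkey : (fun x => (PySem.Dict.counter list).getD x 0) = fun x => ((list.count x : Nat) : Int) := by
    funext x; exact PySem.Dict.getD_counter list x
  rw [hkeys, hkey]
  have hmem : ∀ x ∈ PySem.Set.ofList list, ((list.count x : Nat) : Int) ∈ PySem.List.pyRange 1 (m + 1) 1 := by
    intro x hx
    rw [PySem.List.mem_pyRange_one]
    constructor
    · have : x ∈ list := (PySem.Set.mem_ofList _ _).mp hx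
      have := List.count_pos_iff.mpr this
      omega
    · have hvmem : ((list.count x : Nat) : Int) ∈ (PySem.Dict.counter list).values := by
        simp only [PySem.Dict.values, PySem.Dict.items_counter, List.map_map]
        exact List.mem_map.mpr ⟨x, hx, rfl⟩
      have := PySem.List.le_maxD_id (PySem.Dict.counter list).values 0 _ hvmem
      omega
  rw [sorted_eq_flatMap_filter _ _ (PySem.List.pairwise_lt_pyRange_one 1 (m+1)) _ hmem]
  exact (List.flatMap_congr (fun c _ => (hbucket c).symm))

-- ===== VERDICT (by name: the statement is the Claim_ definition above) =====
theorem nth_most_rare_signature_spec : Claim_equal_nth_most_rare_signature := by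
  intro list n _
  unfold Spec_nth_most_rare_signature nth_most_rare_signature nth_most_rare_signature_alt
  simp only [PySem.Dict.foldl_insert_getD_add_one_eq_counter]
  simp only [PySem.List.foldl_append_eq_flatMap, List.nil_append]
  rw [← result_lists_eq list]
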